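-- pv_equiv track=rewrite | github.com/Hondarer/make-framework | bin/fix_if_comments.py | _common_macro_prefix
-- ===== SOURCE A (Python) =====
-- def _common_macro_prefix(macros):
--     """複数マクロの意味のある共通接頭辞を返す。なければ None。"""
--     if len(macros) < 2:
--         return None
--
--     prefix = macros[0]
--     for macro in macros[1:]:
--         limit = min(len(prefix), len(macro))
--         index = 0
--         while index < limit and prefix[index] == macro[index]:
--             index += 1
--         prefix = prefix[:index]
--         if not prefix:
--             return None
--
--     boundary = prefix.rfind('_')
--     if boundary < 0:
--         return None
--
--     prefix = prefix[:boundary + 1]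
--     return prefix if prefix.strip('_') else None
-- ===== SOURCE B (Python) =====
-- def _common_macro_prefix(macros):
--     """Column-wise scan: advance one character index while all macros agree."""
--     if len(macros) < 2:
--         return None
--     first = macros[0]
--     k = 0
--     while k < len(first) and all(k < len(m) and m[k] == first[k] for m in macros):
--         k += 1
--     prefix = first[:k]
--     cut = prefix.rfind('_')
--     if cut < 0:
--         return None
--     keep = prefix[:cut + 1]
--     return keep if any(c != '_' for c in keep) else None
-- ===== Notes on version B (the rewrite author's own statement) =====
-- stated objective: simpler
-- what changed: A reduces a running prefix pairwise against every other string (an inner character loop per string); B does a single column-wise scan, advancing one character index while all macros agree at that index, then applies the same underscore-boundary trim (with an any() check instead of strip('_')).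
import Mathlib
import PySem

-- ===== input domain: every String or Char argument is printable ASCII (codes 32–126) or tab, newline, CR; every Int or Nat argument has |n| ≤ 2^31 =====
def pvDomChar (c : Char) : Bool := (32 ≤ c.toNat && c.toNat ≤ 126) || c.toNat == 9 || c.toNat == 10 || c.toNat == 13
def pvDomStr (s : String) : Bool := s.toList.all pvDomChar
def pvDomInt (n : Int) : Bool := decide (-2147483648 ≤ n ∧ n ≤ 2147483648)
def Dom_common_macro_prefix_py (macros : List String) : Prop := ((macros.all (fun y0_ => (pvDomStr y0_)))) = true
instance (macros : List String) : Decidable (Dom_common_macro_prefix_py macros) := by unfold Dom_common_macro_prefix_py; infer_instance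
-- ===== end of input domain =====

-- B replaces A's pairwise-reduction over every string by a single column-wise index scan
-- (advance one character position while all macros agree); objective: simpler.

-- generic while-loop counter: 'while k < bound and guard(k): k += 1'
def pvWhileCount (guard : Nat → Bool) (bound k : Nat) : Nat :=
  if k < bound ∧ guard k = true then pvWhileCount guard bound (k + 1) else k
termination_by bound - k

-- ===== PORT A =====
-- one iteration of A's 'for macro in macros[1:]' (none = the early 'return None')
def pvStepA (acc : Option (List Char)) (m : List Char) : Option (List Char) :=
  match acc with
  | none => none
  | some p =>
    let limit := min p.length m.length
    let index := pvWhileCount (fun j => p[j]? == m[j]?) limit 0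
    let p := p.take index          -- prefix = prefix[:index]
    if p = [] then none else some p

def common_macro_prefix_py (macros : List String) : Option String :=
  if macros.length < 2 then none
  else
    match macros with
    | [] => none                   -- unreachable: length ≥ 2
    | first :: rest =>
      match (rest.map String.toList).foldl pvStepA (some first.toList) with
      | none => none
      | some p =>
        let boundary := PySem.Chars.rfind p ['_']
        if boundary < 0 then none
        else
          let p := p.take (boundary + 1).toNat     -- prefix = prefix[:boundary+1]
          if PySem.Chars.stripChars p ['_'] = [] then none else some (String.ofList p)

-- ===== PORT B =====
-- Source B's 'all(k < len(m) and m[k] == first[k] for m in macros)'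
def pvColOk (ms : List (List Char)) (f : List Char) (k : Nat) : Bool :=
  ms.all (fun m => decide (k < m.length) && (m[k]? == f[k]?))

def common_macro_prefix_py_alt (macros : List String) : Option String :=
  if macros.length < 2 then none
  else
    match macros with
    | [] => none                   -- unreachable: length ≥ 2
    | first :: _ =>
      let f := first.toList
      let ms := macros.map String.toList
      let k := pvWhileCount (fun k => pvColOk ms f k) f.length 0
      let pfx := f.take k
      let cut := PySem.Chars.rfind pfx ['_']
      if cut < 0 then none
      else
        let keep := pfx.take (cut + 1).toNat
        if keep.any (fun c => c ≠ '_') then some (String.ofList keep) else none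

-- ===== PRECONDITION & SPEC =====
def Spec_common_macro_prefix_py (macros : List String) (out : Option String) : Prop := out = common_macro_prefix_py_alt macros
instance (macros : List String) (out : Option String) : Decidable (Spec_common_macro_prefix_py macros out) := by unfold Spec_common_macro_prefix_py; infer_instance

-- ===== CLAIM (what is proved, stated in full; the proofs are below) =====
def Claim_equal_common_macro_prefix_py : Prop := ∀ (macros : List String), Dom_common_macro_prefix_py macros → Spec_common_macro_prefix_py macros (common_macro_prefix_py macros)

-- ===== LEMMAS AND PROOFS =====

-- length of the longest common prefix of two lists
def pvLcpLen : List Char → List Char → Nat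
  | a :: as, b :: bs => if a = b then pvLcpLen as bs + 1 else 0
  | _, _ => 0

def pvLcp (p m : List Char) : List Char := p.take (pvLcpLen p m)

-- the while loop stops exactly at the first failing index
theorem pvWhileCount_eq (guard : Nat → Bool) (bound n : Nat)
    (h1 : ∀ j < n, j < bound ∧ guard j = true)
    (h2 : ¬ (n < bound ∧ guard n = true)) :
    ∀ k ≤ n, pvWhileCount guard bound k = n := by
  intro k hk
  induction hn : n - k generalizing k with
  | zero =>
    have : k = n := by omega
    subst this
    rw [pvWhileCount]
    simp [h2]
  | succ i ih =>
    have hkn : k < n := by omega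
    obtain ⟨hb, hg⟩ := h1 k hkn
    rw [pvWhileCount]
    simp only [hb, hg, and_self, if_pos]
    exact ih (k+1) (by omega) (by omega)

theorem pvLcpLen_le_left : ∀ p m : List Char, pvLcpLen p m ≤ p.length := by
  intro p
  induction p with
  | nil => intro m; cases m <;> simp [pvLcpLen]
  | cons a as ih =>
    intro m
    cases m with
    | nil => simp [pvLcpLen]
    | cons b bs =>
      simp only [pvLcpLen]
      split
      · simpa using ih bs
      · simp

theorem pvLcpLen_le_right : ∀ p m : List Char, pvLcpLen p m ≤ m.length := by
  intro p
  induction p with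
  | nil => intro m; cases m <;> simp [pvLcpLen]
  | cons a as ih =>
    intro m
    cases m with
    | nil => simp [pvLcpLen]
    | cons b bs =>
      simp only [pvLcpLen]
      split
      · simpa using ih bs
      · simp

theorem pvLcpLen_agree : ∀ (p m : List Char) (j : Nat), j < pvLcpLen p m → p[j]? = m[j]? := by
  intro p
  induction p with
  | nil => intro m j h; cases m <;> simp [pvLcpLen] at h
  | cons a as ih =>
    intro m j h
    cases m with
    | nil => simp [pvLcpLen] at h
    | cons b bs =>
      by_cases hab : a = b
      · rw [show pvLcpLen (a :: as) (b :: bs) = pvLcpLen as bs + 1 by simp [pvLcpLen, hab]] at h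
        cases j with
        | zero => simp [hab]
        | succ j' => simpa using ih bs j' (by omega)
      · rw [show pvLcpLen (a :: as) (b :: bs) = 0 by simp [pvLcpLen, hab]] at h
        omega

theorem pvLcpLen_stop : ∀ (p m : List Char), pvLcpLen p m < p.length → pvLcpLen p m < m.length →
    p[pvLcpLen p m]? ≠ m[pvLcpLen p m]? := by
  intro p
  induction p with
  | nil => intro m h1 _; simp at h1
  | cons a as ih =>
    intro m h1 h2
    cases m with
    | nil => simp at h2
    | cons b bs =>
      by_cases hab : a = b
      · have he : pvLcpLen (a :: as) (b :: bs) = pvLcpLen as bs + 1 := by simp [pvLcpLen, hab]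
        rw [he] at h1 h2 ⊢
        simpa using ih bs (by simpa using h1) (by simpa using h2)
      · have he : pvLcpLen (a :: as) (b :: bs) = 0 := by simp [pvLcpLen, hab]
        rw [he]
        simp [hab]

theorem pvWhileA_eq (p m : List Char) :
    pvWhileCount (fun j => p[j]? == m[j]?) (min p.length m.length) 0 = pvLcpLen p m := by
  apply pvWhileCount_eq
  · intro j hj
    constructor
    · have h1 := pvLcpLen_le_left p m
      have h2 := pvLcpLen_le_right p m
      omega
    · simp [pvLcpLen_agree p m j hj]
  · rintro ⟨hlt, hg⟩
    have h1 : pvLcpLen p m < p.length := by omega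
    have h2 : pvLcpLen p m < m.length := by omega
    exact pvLcpLen_stop p m h1 h2 (by simpa using hg)
  · omega

theorem pvStepA_some (p m : List Char) :
    pvStepA (some p) m = if pvLcp p m = [] then none else some (pvLcp p m) := by
  simp only [pvStepA, pvWhileA_eq, pvLcp]

theorem pvFoldA_none (rest : List (List Char)) : rest.foldl pvStepA none = none := by
  induction rest with
  | nil => rfl
  | cons m rest ih => simpa [pvStepA] using ih

theorem pvLcp_nil (m : List Char) : pvLcp [] m = [] := by simp [pvLcp]

theorem pvFoldLcp_nil (rest : List (List Char)) : rest.foldl pvLcp [] = [] := by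
  induction rest with
  | nil => rfl
  | cons m rest ih => simpa [pvLcp_nil] using ih

theorem pvFoldA_eq : ∀ (rest : List (List Char)) (m p : List Char),
    (m :: rest).foldl pvStepA (some p) =
      (if (m :: rest).foldl pvLcp p = [] then none else some ((m :: rest).foldl pvLcp p)) := by
  intro rest
  induction rest with
  | nil =>
    intro m p
    simp only [List.foldl_cons, List.foldl_nil, pvStepA_some]
  | cons m' rest ih =>
    intro m p
    rw [List.foldl_cons, List.foldl_cons (f := pvLcp)]
    by_cases h : pvLcp p m = []
    · rw [show pvStepA (some p) m = none by rw [pvStepA_some]; simp [h]]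
      rw [h]
      rw [show List.foldl pvStepA none (m' :: rest) = none from pvFoldA_none _]
      rw [show List.foldl pvLcp [] (m' :: rest) = [] from pvFoldLcp_nil _]
      simp
    · rw [show pvStepA (some p) m = some (pvLcp p m) by rw [pvStepA_some]; simp [h]]
      exact ih m' (pvLcp p m)

-- truncating the left argument truncates the common prefix length
theorem pvLcpLen_take : ∀ (f m : List Char) (n : Nat),
    pvLcpLen (f.take n) m = min n (pvLcpLen f m) := by
  intro f
  induction f with
  | nil => intro m n; cases m <;> simp [pvLcpLen]
  | cons a as ih =>
    intro m n
    cases n with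
    | zero => cases m <;> simp [pvLcpLen]
    | succ n' =>
      cases m with
      | nil => simp [pvLcpLen]
      | cons b bs =>
        simp only [List.take_succ_cons, pvLcpLen]
        by_cases hab : a = b
        · simp [hab, ih bs n']
        · simp [hab]

theorem pvLcp_take (f m : List Char) (n : Nat) :
    pvLcp (f.take n) m = f.take (min n (pvLcpLen f m)) := by
  simp [pvLcp, pvLcpLen_take, List.take_take]

theorem pvFoldLcp_take : ∀ (rest : List (List Char)) (f : List Char) (n : Nat),
    rest.foldl pvLcp (f.take n) =
      f.take (rest.foldl (fun n m => min n (pvLcpLen f m)) n) := by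
  intro rest
  induction rest with
  | nil => intro f n; rfl
  | cons m rest ih =>
    intro f n
    simp only [List.foldl_cons, pvLcp_take]
    exact ih f (min n (pvLcpLen f m))

theorem pvFoldMin_le_init (g : List Char → Nat) :
    ∀ (l : List (List Char)) (n : Nat), l.foldl (fun n m => min n (g m)) n ≤ n := by
  intro l
  induction l with
  | nil => intro n; simp
  | cons m l ih =>
    intro n
    simp only [List.foldl_cons]
    exact le_trans (ih _) (by omega)

theorem pvFoldMin_le_mem (g : List Char → Nat) :
    ∀ (l : List (List Char)) (n : Nat) (m : List Char), m ∈ l →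
      l.foldl (fun n m => min n (g m)) n ≤ g m := by
  intro l
  induction l with
  | nil => intro n m h; simp at h
  | cons m' l ih =>
    intro n m h
    simp only [List.mem_cons] at h
    simp only [List.foldl_cons]
    rcases h with h | h
    · subst h; exact le_trans (pvFoldMin_le_init g l _) (by omega)
    · exact ih _ m h

theorem pvFoldMin_reached (g : List Char → Nat) :
    ∀ (l : List (List Char)) (n : Nat),
      l.foldl (fun n m => min n (g m)) n = n ∨
      ∃ m ∈ l, l.foldl (fun n m => min n (g m)) n = g m := by
  intro l
  induction l with
  | nil => intro n; left; rfl
  | cons m' l ih =>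
    intro n
    rcases ih (min n (g m')) with h | ⟨m, hm, hv⟩
    · simp only [List.foldl_cons, h]
      by_cases hmn : n ≤ g m'
      · left; omega
      · right; exact ⟨m', by simp, by omega⟩
    · right; exact ⟨m, by simp [hm], by simpa using hv⟩

-- B's column scan stops exactly at the fold-of-minima length
theorem pvWhileB_eq (f : List Char) (restL : List (List Char)) :
    pvWhileCount (fun k => pvColOk (f :: restL) f k) f.length 0 =
      restL.foldl (fun n m => min n (pvLcpLen f m)) f.length := by
  set N := restL.foldl (fun n m => min n (pvLcpLen f m)) f.length with hN
  have hNf : N ≤ f.length := pvFoldMin_le_init _ restL f.length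
  apply pvWhileCount_eq
  · intro j hj
    have hjf : j < f.length := by omega
    refine ⟨hjf, ?_⟩
    simp only [pvColOk, List.all_eq_true]
    intro m hm
    simp only [List.mem_cons] at hm
    rcases hm with rfl | hm
    · simp [hjf]
    · have hle : N ≤ pvLcpLen f m := pvFoldMin_le_mem _ restL f.length m hm
      have hjl : j < pvLcpLen f m := by omega
      have := pvLcpLen_agree f m j hjl
      have hjm : j < m.length := by have := pvLcpLen_le_right f m; omega
      simp [hjm, this]
  · rintro ⟨hlt, hg⟩
    rcases pvFoldMin_reached (fun m => pvLcpLen f m) restL f.length with h | ⟨m, hm, hv⟩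
    · rw [← hN] at h; omega
    · rw [← hN] at hv
      simp only [pvColOk, List.all_eq_true] at hg
      have := hg m (by simp [hm])
      simp only [Bool.and_eq_true, decide_eq_true_eq, beq_iff_eq] at this
      obtain ⟨hNm, heq⟩ := this
      exact pvLcpLen_stop f m (by omega) (by omega) (by rw [← hv]; exact heq.symm)
  · omega

theorem pvStrip_empty_iff (l : List Char) :
    PySem.Chars.stripChars l ['_'] = [] ↔ ∀ c ∈ l, c = '_' := by
  simp [PySem.Chars.stripChars]
  constructor
  · intro h c hc
    by_contra hne
    induction l with
    | nil => simp at hc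
    | cons a as ih =>
      simp only [List.mem_cons] at hc
      by_cases ha : a = '_'
      · rcases hc with rfl | hc
        · exact hne ha
        · exact ih (by simpa [ha] using h) hc
      · have : a ∈ List.dropWhile (fun c => decide (c = '_')) (a :: as) := by
          simp [List.dropWhile, ha]
        have := h a this
        exact ha this
  · intro h x hx
    exact h x (List.Sublist.mem hx (List.dropWhile_sublist _))

-- ===== VERDICT (by name: the statement is the Claim_ definition above) =====
theorem common_macro_prefix_py_spec : Claim_equal_common_macro_prefix_py := by
  intro macros _
  unfold Spec_common_macro_prefix_py
  unfold common_macro_prefix_py common_macro_prefix_py_alt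
  rcases macros with _ | ⟨first, _ | ⟨m2, rest⟩⟩
  · simp
  · simp
  · have hlen : ¬ (first :: m2 :: rest).length < 2 := by simp
    simp only [hlen, if_false, List.map_cons]
    set f := first.toList with hf
    set restL := m2.toList :: rest.map String.toList with hrestL
    set N := restL.foldl (fun n m => min n (pvLcpLen f m)) f.length with hN
    rw [show restL.foldl pvStepA (some f) =
        (if restL.foldl pvLcp f = [] then none else some (restL.foldl pvLcp f)) by
      rw [hrestL]; exact pvFoldA_eq _ _ _]
    rw [show restL.foldl pvLcp f = f.take N by
      conv_lhs => rw [show f = f.take f.length by simp]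
      exact pvFoldLcp_take restL f f.length]
    rw [show pvWhileCount (fun k => pvColOk (f :: restL) f k) f.length 0 = N from
      pvWhileB_eq f restL]
    by_cases hP : f.take N = []
    · simp only [hP, if_pos]
      have h1 : PySem.Chars.rfind ([] : List Char) ['_'] = -1 := by decide
      simp [h1]
    · simp only [hP, if_false]
      set b := PySem.Chars.rfind (f.take N) ['_'] with hb
      by_cases hbneg : b < 0
      · simp [hbneg]
      · simp only [hbneg, if_false]
        set keep := (f.take N).take (b + 1).toNat with hkeep
        by_cases hall : ∀ c ∈ keep, c = '_'
        · rw [if_pos ((pvStrip_empty_iff keep).mpr hall)]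
          rw [if_neg (by simp; exact hall)]
        · rw [if_neg (fun h => hall ((pvStrip_empty_iff keep).mp h))]
          rw [if_pos (by simpa using hall)]
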